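-- pv_equiv track=rewrite | github.com/kimphysicsman/nbcamp-algorithm-220727 | 1316.py | check_group_word
-- ===== SOURCE A (Python) =====
-- def check_group_word(word):
--     check_box = dict()
--     current_char = None
--
--     for char in word:
--         if char not in check_box:
--             check_box[char] = True
--             current_char = char
--         elif current_char == char:
--             continue
--         else:
--             return False
--
--     return True
-- ===== SOURCE B (Python) =====
-- def check_group_word(word):
--     # collapse adjacent duplicates to run leaders, then check they are all distinct
--     groups = [c for i, c in enumerate(word) if i == 0 or word[i - 1] != c]
--     return len(groups) == len(set(groups))
-- ===== Notes on version B (the rewrite author's own statement) =====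
-- stated objective: simpler
-- what changed: Replaces A's stateful early-return scan with a seen-dict and current-char by a two-phase computation: collapse adjacent duplicates into run leaders, then compare len(groups) to len(set(groups)).
import Mathlib
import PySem

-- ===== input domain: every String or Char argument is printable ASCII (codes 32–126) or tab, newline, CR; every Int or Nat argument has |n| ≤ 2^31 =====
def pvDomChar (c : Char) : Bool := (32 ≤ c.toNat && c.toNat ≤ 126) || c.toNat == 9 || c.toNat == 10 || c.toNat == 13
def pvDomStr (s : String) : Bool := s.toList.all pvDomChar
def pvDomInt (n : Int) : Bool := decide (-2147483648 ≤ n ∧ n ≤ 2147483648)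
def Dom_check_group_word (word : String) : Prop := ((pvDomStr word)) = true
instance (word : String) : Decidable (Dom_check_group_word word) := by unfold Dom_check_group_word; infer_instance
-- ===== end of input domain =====

-- B replaces A's stateful seen-dict scan by collapsing adjacent duplicates and checking the run leaders are distinct (simpler, same cost).


-- ===== PORT A =====
-- the for-loop of A: state = (check_box, current_char); early 'return False' = result false
def pvLoopA : List Char → PySem.Dict Char Bool → Option Char → Bool
  | [], _, _ => true
  | c :: rest, box, cur =>
    if (PySem.Dict.get? box c) = none then
      pvLoopA rest (PySem.Dict.insert box c true) (some c)
    else if cur = some c then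
      pvLoopA rest box cur
    else
      false

def check_group_word (word : String) : Bool :=
  pvLoopA word.toList PySem.Dict.empty none

-- ===== PORT B =====
-- [c for i, c in enumerate(word) if i == 0 or word[i-1] != c]
def pvGroups : List Char → List Char
  | [] => []
  | [c] => [c]
  | a :: b :: rest => if b = a then pvGroups (b :: rest) else a :: pvGroups (b :: rest)

def check_group_word_alt (word : String) : Bool :=
  let groups := pvGroups word.toList
  groups.length == (PySem.Set.ofList groups).length

-- ===== PRECONDITION & SPEC =====
def Spec_check_group_word (word : String) (out : Bool) : Prop := out = check_group_word_alt word
instance (word : String) (out : Bool) : Decidable (Spec_check_group_word word out) := by unfold Spec_check_group_word; infer_instance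

-- ===== CLAIM (what is proved, stated in full; the proofs are below) =====
def Claim_equal_check_group_word : Prop := ∀ (word : String), Dom_check_group_word word → Spec_check_group_word word (check_group_word word)

-- ===== LEMMAS AND PROOFS =====

-- run leaders of l, given that the previous character was `cur` (A's current_char)
def pvGroups2 : Option Char → List Char → List Char
  | _, [] => []
  | cur, c :: rest => if cur = some c then pvGroups2 cur rest else c :: pvGroups2 (some c) rest

lemma pvGroups_cons (a : Char) (l : List Char) :
    pvGroups (a :: l) = a :: pvGroups2 (some a) l := by
  induction l generalizing a with
  | nil => rfl
  | cons b r ih =>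
    simp only [pvGroups, pvGroups2, ih]
    by_cases h : b = a
    · subst h; simp
    · simp [h, Ne.symm h]

lemma pvGroups_eq_groups2 (l : List Char) : pvGroups l = pvGroups2 none l := by
  cases l with
  | nil => rfl
  | cons a r => simp [pvGroups_cons, pvGroups2]

lemma pvLoopA_eq (l : List Char) :
    ∀ (box : PySem.Dict Char Bool) (cur : Option Char),
      (∀ c, cur = some c → PySem.Dict.get? box c ≠ none) →
      (pvLoopA l box cur = true ↔
        (pvGroups2 cur l).Nodup ∧ ∀ x ∈ pvGroups2 cur l, PySem.Dict.get? box x = none) := by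
  induction l with
  | nil => intro box cur _; simp [pvLoopA, pvGroups2]
  | cons c rest ih =>
    intro box cur hinv
    by_cases hc : PySem.Dict.get? box c = none
    · have hcur : cur ≠ some c := fun h => hinv c h hc
      rw [show pvGroups2 cur (c :: rest) = c :: pvGroups2 (some c) rest by
        simp [pvGroups2, hcur]]
      have hinv' : ∀ d, some c = some d → PySem.Dict.get? (PySem.Dict.insert box c true) d ≠ none := by
        intro d hd; cases hd; simp [PySem.Dict.get?_insert_self]
      rw [show pvLoopA (c :: rest) box cur = pvLoopA rest (PySem.Dict.insert box c true) (some c) by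
        simp [pvLoopA, hc]]
      rw [ih _ _ hinv']
      constructor
      · rintro ⟨hnd, hall⟩
        have hmem : c ∉ pvGroups2 (some c) rest := by
          intro hm
          have := hall c hm
          rw [PySem.Dict.get?_insert_self] at this
          exact Option.some_ne_none _ this
        refine ⟨List.nodup_cons.mpr ⟨hmem, hnd⟩, ?_⟩
        intro x hx
        rcases List.mem_cons.mp hx with rfl | hx'
        · exact hc
        · have := hall x hx'
          have hne : x ≠ c := fun h => by
            subst h
            rw [PySem.Dict.get?_insert_self] at this
            exact Option.some_ne_none _ this
          rwa [PySem.Dict.get?_insert_of_ne box true hne] at this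
      · rintro ⟨hnd, hall⟩
        have hmem := (List.nodup_cons.mp hnd).1
        refine ⟨(List.nodup_cons.mp hnd).2, ?_⟩
        intro x hx
        have hne : x ≠ c := fun h => hmem (h ▸ hx)
        rw [PySem.Dict.get?_insert_of_ne box true hne]
        exact hall x (List.mem_cons_of_mem _ hx)
    · by_cases hcur : cur = some c
      · rw [show pvLoopA (c :: rest) box cur = pvLoopA rest box cur by
          simp [pvLoopA, hc, hcur]]
        rw [show pvGroups2 cur (c :: rest) = pvGroups2 cur rest by simp [pvGroups2, hcur]]
        exact ih box cur hinv
      · rw [show pvLoopA (c :: rest) box cur = false by simp [pvLoopA, hc, hcur]]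
        rw [show pvGroups2 cur (c :: rest) = c :: pvGroups2 (some c) rest by
          simp [pvGroups2, hcur]]
        simp only [Bool.false_eq_true, false_iff, not_and]
        intro _ hall
        exact hc (hall c (List.mem_cons_self))

lemma alt_eq_nodup (word : String) :
    check_group_word_alt word = decide (pvGroups word.toList).Nodup := by
  rw [show check_group_word_alt word =
    ((pvGroups word.toList).length == (PySem.Set.ofList (pvGroups word.toList)).length) from rfl]
  set g := pvGroups word.toList with hg
  by_cases hnd : g.Nodup
  · rw [PySem.Set.ofList_eq_self_of_nodup g hnd]
    simp [hnd]
  · have hsub : (PySem.Set.ofList g).length ≠ g.length := by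
      intro hlen
      have hperm : g.dedup.length = g.length := by
        have h1 : (PySem.Set.ofList g) = PySem.List.dedup g := (PySem.List.dedup_eq_ofList g).symm
        have h2 : (PySem.List.dedup g).Perm g.dedup := by
          refine List.perm_ext_iff_of_nodup ?_ ?_ |>.mpr ?_
          · rw [← h1]; exact PySem.Set.nodup_ofList g
          · exact g.nodup_dedup
          · intro x; rw [PySem.List.mem_dedup, List.mem_dedup]
        calc g.dedup.length = (PySem.List.dedup g).length := (h2.length_eq).symm
          _ = g.length := by rw [← h1, hlen]
      exact hnd (by
        have := List.Sublist.eq_of_length (List.dedup_sublist g) hperm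
        rw [← this]; exact g.nodup_dedup)
    simp [hnd]
    exact fun h => hsub h.symm

-- ===== VERDICT (by name: the statement is the Claim_ definition above) =====
theorem check_group_word_spec : Claim_equal_check_group_word := by
  intro word _
  unfold Spec_check_group_word check_group_word
  rw [alt_eq_nodup, pvGroups_eq_groups2]
  have h := pvLoopA_eq word.toList PySem.Dict.empty none (by intro c h; cases h)
  by_cases hnd : (pvGroups2 none word.toList).Nodup
  · simp only [hnd, decide_true]
    exact h.mpr ⟨hnd, fun x _ => PySem.Dict.get?_empty x⟩
  · simp only [hnd, decide_false]
    rw [← Bool.not_eq_true]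
    intro habs
    exact hnd (h.mp habs).1
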